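-- pv_equiv track=rewrite | github.com/CaelumSculptoris/trip-pqc | veinn/cli/primitive.py | mat_mul_LU
-- ===== SOURCE A (Python) =====
-- MASK32 = (1 << 32) - 1
--
-- def mat_mul_LU(vec, L, U, n):
--     # y = L * vec
--     y = [0]*n
--     for i in range(n):
--         s = 0
--         for j in range(i+1):  # j <= i
--             s = (s + L[i][j]*vec[j]) & MASK32
--         y[i] = s
--     # z = U * y
--     z = [0]*n
--     for i in range(n):
--         s = 0
--         for j in range(i, n):  # j >= i
--             s = (s + U[i][j]*y[j]) & MASK32
--         z[i] = s
--     return z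
-- ===== SOURCE B (Python) =====
-- MASK32 = (1 << 32) - 1
--
-- def mat_mul_LU(vec, L, U, n):
--     # Fused single pass: no intermediate y vector is stored.  Each column j of the
--     # combined product contributes the scalar yj = (L[j][:j+1] . vec) & MASK32,
--     # computed as one big-int dot product with a single reduction, which is then
--     # scattered into the running accumulators z[0..j]; z is reduced once at the end.
--     z = [0] * n
--     for j in range(n):
--         yj = sum(a * b for a, b in zip(L[j][: j + 1], vec)) & MASK32
--         for i in range(j + 1):
--             z[i] += U[i][j] * yj
--     return [s & MASK32 for s in z]
-- ===== Notes on version B (the rewrite author's own statement) =====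
-- stated objective: alternative
-- what changed: B fuses the two staged triangular products into a single pass with no stored intermediate vector: for each column j it forms one scalar y_j as a big-integer dot product reduced once (instead of A's per-step masking), immediately scatters U[i][j]*y_j into running z accumulators, and reduces z once at the end.
import Mathlib
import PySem

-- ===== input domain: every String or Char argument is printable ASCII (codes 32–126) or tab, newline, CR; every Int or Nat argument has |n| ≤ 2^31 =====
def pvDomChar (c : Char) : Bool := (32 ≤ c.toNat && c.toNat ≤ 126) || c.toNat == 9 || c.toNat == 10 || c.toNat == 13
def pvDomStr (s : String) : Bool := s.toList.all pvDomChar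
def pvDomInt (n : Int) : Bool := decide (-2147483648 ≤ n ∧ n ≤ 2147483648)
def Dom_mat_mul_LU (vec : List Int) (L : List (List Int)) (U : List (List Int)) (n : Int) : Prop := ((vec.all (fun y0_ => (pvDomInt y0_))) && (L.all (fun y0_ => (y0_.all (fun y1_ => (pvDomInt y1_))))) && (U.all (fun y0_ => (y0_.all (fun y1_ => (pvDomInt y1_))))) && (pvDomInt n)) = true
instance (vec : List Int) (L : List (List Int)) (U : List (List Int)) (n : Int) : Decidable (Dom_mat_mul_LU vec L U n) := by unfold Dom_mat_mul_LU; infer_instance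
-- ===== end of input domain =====

-- B fuses A's two staged triangular products into one pass: per column j a scalar
-- y_j is formed as a single big-int dot product with one reduction (no per-step
-- masking, no stored y vector) and scattered into running z accumulators, which
-- are reduced once at the end (objective: alternative; same O(n^2) cost).

-- ===== PORT A =====
-- two staged passes; each output entry finalised by an inner dot-product loop with per-step masking
def mat_mul_LU (vec : List Int) (L : List (List Int)) (U : List (List Int)) (n : Int) : List Int :=
  let m := n.toNat
  let y := (List.range m).map (fun i =>
    (List.range (i+1)).foldl
      (fun s j => (s + (L.getD i []).getD j 0 * vec.getD j 0) % 4294967296) 0)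
  (List.range m).map (fun i =>
    (List.range' i (m - i)).foldl
      (fun s j => (s + (U.getD i []).getD j 0 * y.getD j 0) % 4294967296) 0)

-- ===== PORT B =====
-- single fused pass: per column j, a zip dot product reduced once gives the scalar yj,
-- which is scattered unmasked into the z accumulators; z is reduced once at the end
def mat_mul_LU_alt (vec : List Int) (L : List (List Int)) (U : List (List Int)) (n : Int) : List Int :=
  let m := n.toNat
  let z := (List.range m).foldl
    (fun z j =>
      let yj := (((L.getD j []).take (j+1)).zip vec).foldl (fun s p => s + p.1 * p.2) 0 % 4294967296
      (List.range (j+1)).foldl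
        (fun z i => z.set i (z.getD i 0 + (U.getD i []).getD j 0 * yj)) z)
    (List.replicate m 0)
  z.map (fun s => s % 4294967296)

-- ===== PRECONDITION & SPEC =====
-- Pre_ excludes exactly the inputs on which Python A raises IndexError:
-- n entries must exist in vec, L and U, row i of L needs length > i, rows of U need length ≥ n.
def Pre_mat_mul_LU (vec : List Int) (L : List (List Int)) (U : List (List Int)) (n : Int) : Prop :=
  n.toNat ≤ vec.length ∧ n.toNat ≤ L.length ∧ n.toNat ≤ U.length ∧
  ∀ i < n.toNat, i < (L.getD i []).length ∧ n.toNat ≤ (U.getD i []).length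
instance (vec : List Int) (L : List (List Int)) (U : List (List Int)) (n : Int) : Decidable (Pre_mat_mul_LU vec L U n) := by unfold Pre_mat_mul_LU; infer_instance

def pvWitness_mat_mul_LU : List Int × List (List Int) × List (List Int) × Int :=
  ([1, 2], [[1, 0], [2, 3]], [[4, 5], [0, 6]], 2)

def Spec_mat_mul_LU (vec : List Int) (L : List (List Int)) (U : List (List Int)) (n : Int) (out : List Int) : Prop := out = mat_mul_LU_alt vec L U n
instance (vec : List Int) (L : List (List Int)) (U : List (List Int)) (n : Int) (out : List Int) : Decidable (Spec_mat_mul_LU vec L U n out) := by unfold Spec_mat_mul_LU; infer_instance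

-- ===== CLAIM (what is proved, stated in full; the proofs are below) =====
def Claim_equal_mat_mul_LU : Prop := ∀ (vec : List Int) (L : List (List Int)) (U : List (List Int)) (n : Int), Dom_mat_mul_LU vec L U n → Pre_mat_mul_LU vec L U n → Spec_mat_mul_LU vec L U n (mat_mul_LU vec L U n)

-- ===== LEMMAS AND PROOFS =====

-- a per-step-masked accumulation equals the unmasked accumulation reduced once
theorem pvModFold (f : Nat → Int) :
    ∀ (l : List Nat) (s : Int),
      l.foldl (fun s j => (s + f j) % 4294967296) (s % 4294967296) =
        (l.foldl (fun s j => s + f j) s) % 4294967296 := by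
  intro l
  induction l with
  | nil => intro s; simp
  | cons a t ih =>
      intro s
      rw [List.foldl_cons, List.foldl_cons]
      have h : (s % 4294967296 + f a) % 4294967296 = (s + f a) % 4294967296 := by omega
      rw [h, ← ih (s + f a)]

theorem pvModFold0 (f : Nat → Int) (l : List Nat) :
    l.foldl (fun s j => (s + f j) % 4294967296) 0 =
      (l.foldl (fun s j => s + f j) 0) % 4294967296 := by
  have h := pvModFold f l 0
  simpa using h

-- the zipped truncated row enumerates exactly the indexed entries
theorem pvZipTake (xs ys : List Int) (t : Nat) (hx : t ≤ xs.length) (hy : t ≤ ys.length) :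
    (xs.take t).zip ys = (List.range t).map (fun k => (xs.getD k 0, ys.getD k 0)) := by
  apply List.ext_getElem
  · simp; omega
  · intro k h1 h2
    have hk : k < t := by simpa using h2
    have hkx : k < xs.length := by omega
    have hky : k < ys.length := by omega
    simp [List.getElem_zip, List.getElem_take, hkx, hky]

theorem pvGetDSet (w : List Int) (i k : Nat) (v : Int) :
    (w.set i v).getD k 0 = if i = k ∧ k < w.length then v else w.getD k 0 := by
  simp [List.getD_eq_getElem?_getD, List.getElem?_set]
  split_ifs with h1 h2 h3 <;> simp_all

theorem pvScatterLen (f : Nat → Int → Int) :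
    ∀ (len a : Nat) (w : List Int),
      ((List.range' a len).foldl (fun w i => w.set i (f i (w.getD i 0))) w).length = w.length := by
  intro len
  induction len with
  | zero => intro a w; simp
  | succ k ih =>
      intro a w
      rw [List.range'_succ, List.foldl_cons, ih]
      simp

theorem pvScatterGetD (f : Nat → Int → Int) :
    ∀ (len a : Nat) (w : List Int) (k : Nat),
      ((List.range' a len).foldl (fun w i => w.set i (f i (w.getD i 0))) w).getD k 0 =
        if a ≤ k ∧ k < a + len ∧ k < w.length then f k (w.getD k 0) else w.getD k 0 := by
  intro len
  induction len with
  | zero => intro a w k; simp; omega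
  | succ m ih =>
      intro a w k
      rw [List.range'_succ, List.foldl_cons, ih, List.length_set, pvGetDSet]
      rcases Nat.lt_trichotomy a k with h | h | h
      · have h1 : ¬ (a = k) := by omega
        split_ifs <;> simp_all <;> omega
      · subst h
        split_ifs <;> simp_all <;> omega
      · have h1 : ¬ (a = k) := by omega
        have h2 : ¬ (a ≤ k) := by omega
        split_ifs <;> simp_all <;> omega

theorem pvGetDMap (f : Nat → Int) (m k : Nat) (h : k < m) :
    ((List.range m).map f).getD k 0 = f k := by
  simp [List.getD_eq_getElem?_getD, h]

-- the unmasked column-scatter loop computes, entry-wise, the row sums over processed columns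
theorem pvScatterPhase (g : Nat → Nat → Int) (m : Nat) :
    ∀ t ≤ m,
      (List.range t).foldl
        (fun w j => (List.range (j+1)).foldl
          (fun w i => w.set i (w.getD i 0 + g i j)) w)
        (List.replicate m 0) =
      (List.range m).map (fun i =>
        (List.range' i (t - i)).foldl (fun s j => s + g i j) 0) := by
  intro t
  induction t with
  | zero =>
      intro _
      apply List.ext_getElem
      · simp
      · intro k h1 h2
        simp
  | succ t ih =>
      intro ht
      have ht' : t ≤ m := Nat.le_of_succ_le ht
      rw [List.range_succ, List.foldl_append, List.foldl_cons, List.foldl_nil, ih ht']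
      rw [show List.range (t+1) = List.range' 0 (t+1) from List.range_eq_range']
      apply List.ext_getElem
      · rw [pvScatterLen (fun i v => v + g i t)]; simp
      · intro k hk1 hk2
        have hkm : k < m := by simpa using hk2
        rw [← List.getD_eq_getElem _ 0 hk1, ← List.getD_eq_getElem _ 0 hk2]
        rw [pvScatterGetD (fun i v => v + g i t), pvGetDMap _ _ _ hkm, pvGetDMap _ _ _ hkm]
        simp only [List.length_map, List.length_range]
        by_cases hc : k ≤ t
        · rw [if_pos ⟨Nat.zero_le k, by omega, hkm⟩]
          have h1 : t + 1 - k = (t - k) + 1 := by omega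
          rw [h1, List.range'_concat]
          have h2 : k + 1 * (t - k) = t := by omega
          rw [h2, List.foldl_append, List.foldl_cons, List.foldl_nil]
        · have h1 : t + 1 - k = t - k := by omega
          rw [if_neg (by omega), h1]

-- ===== VERDICT (by name: the statement is the Claim_ definition above) =====
theorem mat_mul_LU_spec : Claim_equal_mat_mul_LU := by
  intro vec L U n _ hpre
  obtain ⟨hv, hL, hU, hrow⟩ := hpre
  show mat_mul_LU vec L U n = mat_mul_LU_alt vec L U n
  simp only [mat_mul_LU, mat_mul_LU_alt]
  set m := n.toNat with hm
  -- B's per-column scalar equals A's stored y entry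
  have hy : ∀ j < m,
      (((L.getD j []).take (j+1)).zip vec).foldl (fun s p => s + p.1 * p.2) 0 % 4294967296 =
      ((List.range m).map (fun i =>
        (List.range (i+1)).foldl
          (fun s j => (s + (L.getD i []).getD j 0 * vec.getD j 0) % 4294967296) 0)).getD j 0 := by
    intro j hj
    rw [pvGetDMap _ _ _ hj, pvModFold0]
    rw [pvZipTake (L.getD j []) vec (j+1) (by have := (hrow j hj).1; omega) (by omega)]
    rw [List.foldl_map]
  -- rewrite B's fused scatter loop
  rw [pvScatterPhase
    (fun i j => (U.getD i []).getD j 0 *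
      ((((L.getD j []).take (j+1)).zip vec).foldl (fun s p => s + p.1 * p.2) 0 % 4294967296))
    m m le_rfl]
  rw [List.map_map]
  apply List.map_congr_left
  intro i hi
  have him : i < m := List.mem_range.mp hi
  simp only [Function.comp]
  rw [pvModFold0]
  congr 1
  apply PySem.List.foldl_congr_mem
  intro s j hj
  have hjm : j < m := by
    have := List.mem_range'.mp hj
    omega
  rw [hy j hjm]
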